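-- pv_equiv track=rewrite | github.com/AVAuco/proxemicsnetplus | train/load_dataset_train_test.py | get_partition_convNext
-- ===== SOURCE A (Python) =====
-- def get_partition_convNext(set=1):
--   # 1. Indexes of the images that will correspond to train and test
--   #trainfrs = [1:300];
-- 	#testfrs = [301:589];
--   p1=[]
--   p2=[]
--   for i in range(1, 590):
--     if i in range(1,301):
--       p1.append(i)
--     if i in range(301,590):
--       p2.append(i)
--
--   # 2. Set
--   if set==1:
--     train_val=p1
--     test=p2
--   else:
--     train_val=p2
--     test=p1
--
--   # TRAIN/VALIDATION/TEST
--   train=[]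
--   validation=[]
--
--   for i in range(0, len(train_val)):
--     if i in [1,11,21,31,41,51,61,71,81,91,101,111,121,131,141,151,161,171,181,191,201,211,221,231,241,251,261,271,281,291]:
--       validation.append(train_val[i])
--     else:
--       train.append(train_val[i])
--
--
--   return train, validation, test
-- ===== SOURCE B (Python) =====
-- def get_partition_convNext(set=1):
--     # Generate the three partitions directly by value, decade by decade:
--     # per 10-block starting at b, b goes to train, b+1 to validation,
--     # b+2..b+9 to train; no index table or membership scan needed.
--     def split(start, end):
--         validation = list(range(start + 1, end, 10))
--         train = []
--         for b in range(start, end, 10):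
--             train.append(b)
--             train.extend(range(b + 2, min(b + 10, end)))
--         return train, validation
--     if set == 1:
--         train, validation = split(1, 301)
--         test = list(range(301, 590))
--     else:
--         train, validation = split(301, 590)
--         test = list(range(1, 301))
--     return train, validation, test
-- ===== Notes on version B (the rewrite author's own statement) =====
-- stated objective: alternative
-- what changed: B never builds the index arrays or consults the hardcoded validation index table: it generates the three partitions directly by value, decade by decade (each ten-block contributes its first and last eight elements to train and its second element to validation), where A loops over indices with range-membership and table-membership tests.
import Mathlib
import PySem

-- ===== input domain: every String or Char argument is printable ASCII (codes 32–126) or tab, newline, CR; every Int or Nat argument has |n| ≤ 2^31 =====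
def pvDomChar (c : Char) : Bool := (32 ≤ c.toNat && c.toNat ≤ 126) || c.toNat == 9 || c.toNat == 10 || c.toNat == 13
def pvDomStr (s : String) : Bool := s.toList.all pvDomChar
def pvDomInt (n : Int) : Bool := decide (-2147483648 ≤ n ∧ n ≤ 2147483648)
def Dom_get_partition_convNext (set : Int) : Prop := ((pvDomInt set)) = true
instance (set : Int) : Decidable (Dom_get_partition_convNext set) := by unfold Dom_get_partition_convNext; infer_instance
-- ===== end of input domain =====

set_option maxRecDepth 20000
set_option maxHeartbeats 1000000


-- B generates the partitions directly by value, decade by decade (no index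
-- arrays, no membership table); objective: alternative (no speed claim).

-- ===== PORT A =====
def get_partition_convNext (set : Int) : List Int × List Int × List Int :=
  let pp := List.foldl
    (fun (st : List Int × List Int) i =>
      let st := if (PySem.List.pyRange 1 301 1).contains i then (st.1 ++ [i], st.2) else st
      if (PySem.List.pyRange 301 590 1).contains i then (st.1, st.2 ++ [i]) else st)
    ([], []) (PySem.List.pyRange 1 590 1)
  let p1 := pp.1
  let p2 := pp.2
  let tvt := if set == 1 then (p1, p2) else (p2, p1)
  let train_val := tvt.1
  let test := tvt.2
  let idxs : List Int := [1,11,21,31,41,51,61,71,81,91,101,111,121,131,141,151,161,171,181,191,201,211,221,231,241,251,261,271,281,291]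
  let tv := List.foldl
    (fun (st : List Int × List Int) i =>
      if idxs.contains i then (st.1, st.2 ++ [PySem.List.pyGetD train_val i 0])
      else (st.1 ++ [PySem.List.pyGetD train_val i 0], st.2))
    ([], []) (PySem.List.pyRange 0 train_val.length 1)
  (tv.1, tv.2, test)

-- ===== PORT B =====
-- Source B's helper `split(start, end)`: decade-by-decade generation.
def pvSplitB (start stop : Int) : List Int × List Int :=
  let validation := PySem.List.pyRange (start + 1) stop 10
  let train := List.foldl
    (fun (acc : List Int) b => (acc ++ [b]) ++ PySem.List.pyRange (b + 2) (min (b + 10) stop) 1)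
    [] (PySem.List.pyRange start stop 10)
  (train, validation)

def get_partition_convNext_alt (set : Int) : List Int × List Int × List Int :=
  if set == 1 then
    let tv := pvSplitB 1 301
    (tv.1, tv.2, PySem.List.pyRange 301 590 1)
  else
    let tv := pvSplitB 301 590
    (tv.1, tv.2, PySem.List.pyRange 1 301 1)

-- ===== PRECONDITION & SPEC =====
def Spec_get_partition_convNext (set : Int) (out : List Int × List Int × List Int) : Prop := out = get_partition_convNext_alt set
instance (set : Int) (out : List Int × List Int × List Int) : Decidable (Spec_get_partition_convNext set out) := by unfold Spec_get_partition_convNext; infer_instance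

-- ===== CLAIM (what is proved, stated in full; the proofs are below) =====
def Claim_equal_get_partition_convNext : Prop := ∀ (set : Int), Dom_get_partition_convNext set → Spec_get_partition_convNext set (get_partition_convNext set)

-- ===== LEMMAS AND PROOFS =====

-- A's first loop: the two sequential conditional appends split the list into two filters.
theorem split1 (l : List Int) (q1 q2 : Int → Bool) (a b : List Int) :
    List.foldl
      (fun (st : List Int × List Int) i =>
        let st := if q1 i then (st.1 ++ [i], st.2) else st
        if q2 i then (st.1, st.2 ++ [i]) else st)
      (a, b) l
    = (a ++ l.filter q1, b ++ l.filter q2) := by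
  induction l generalizing a b with
  | nil => simp
  | cons x xs ih =>
    cases hq1 : q1 x <;> cases hq2 : q2 x <;>
      simp [List.foldl_cons, hq1, hq2, ih]

-- A's second loop: conditional dispatch of f i into the two output lists.
theorem split2 (l : List Int) (p : Int → Bool) (f : Int → Int) (a b : List Int) :
    List.foldl
      (fun (st : List Int × List Int) i =>
        if p i then (st.1, st.2 ++ [f i]) else (st.1 ++ [f i], st.2))
      (a, b) l
    = (a ++ (l.filter (fun i => !p i)).map f, b ++ (l.filter p).map f) := by
  induction l generalizing a b with
  | nil => simp
  | cons x xs ih =>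
    cases hp : p x <;> simp [List.foldl_cons, hp, ih]

theorem filter_lt (n : Nat) : ∀ (a c b : Int), (b - a).toNat = n → a ≤ c → c ≤ b →
    (PySem.List.pyRange a b 1).filter (fun i => decide (i < c)) = PySem.List.pyRange a c 1 := by
  induction n with
  | zero =>
    intro a c b hn hac hcb
    have hba : b ≤ a := by omega
    have hca : c ≤ a := by omega
    rw [PySem.List.pyRange_one_eq_nil hba, PySem.List.pyRange_one_eq_nil hca]
    rfl
  | succ m ih =>
    intro a c b hn hac hcb
    have hab : a < b := by omega
    rw [PySem.List.pyRange_one_cons hab]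
    by_cases hc : a < c
    · rw [List.filter_cons_of_pos (by simpa using hc),
        ih (a + 1) c b (by omega) (by omega) hcb,
        PySem.List.pyRange_one_cons hc]
    · have hca : c = a := by omega
      rw [List.filter_cons_of_neg (by simpa using hc)]
      rw [List.filter_eq_nil_iff.mpr ?_, PySem.List.pyRange_one_eq_nil (by omega)]
      intro x hx
      have := PySem.List.mem_pyRange_one.mp hx
      simp; omega

theorem filter_ge (n : Nat) : ∀ (a c b : Int), (b - a).toNat = n → a ≤ c → c ≤ b →
    (PySem.List.pyRange a b 1).filter (fun i => decide (c ≤ i)) = PySem.List.pyRange c b 1 := by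
  induction n with
  | zero =>
    intro a c b hn hac hcb
    rw [PySem.List.pyRange_one_eq_nil (by omega), PySem.List.pyRange_one_eq_nil (by omega)]
    rfl
  | succ m ih =>
    intro a c b hn hac hcb
    have hab : a < b := by omega
    rw [PySem.List.pyRange_one_cons hab]
    by_cases hc : c ≤ a
    · have hca : c = a := by omega
      subst hca
      rw [List.filter_cons_of_pos (by simp), PySem.List.pyRange_one_cons hab]
      congr 1
      rw [List.filter_eq_self.mpr ?_]
      intro x hx
      have := PySem.List.mem_pyRange_one.mp hx
      simp; omega
    · rw [List.filter_cons_of_neg (by simpa using hc)]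
      exact ih (a + 1) c b (by omega) (by omega) hcb

theorem contains_p1 (i : Int) :
    (PySem.List.pyRange 1 301 1).contains i = (decide (1 ≤ i) && decide (i < 301)) := by
  rw [Bool.eq_iff_iff]
  simp [PySem.List.mem_pyRange_one]

theorem contains_p2 (i : Int) :
    (PySem.List.pyRange 301 590 1).contains i = (decide (301 ≤ i) && decide (i < 590)) := by
  rw [Bool.eq_iff_iff]
  simp [PySem.List.mem_pyRange_one]

-- the first loop of A produces exactly the two ranges
theorem loop1_eq :
    List.foldl
      (fun (st : List Int × List Int) i =>
        let st := if (PySem.List.pyRange 1 301 1).contains i then (st.1 ++ [i], st.2) else st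
        if (PySem.List.pyRange 301 590 1).contains i then (st.1, st.2 ++ [i]) else st)
      (([] : List Int), ([] : List Int)) (PySem.List.pyRange 1 590 1)
    = (PySem.List.pyRange 1 301 1, PySem.List.pyRange 301 590 1) := by
  rw [split1]
  have h1 : (PySem.List.pyRange 1 590 1).filter (fun i => (PySem.List.pyRange 1 301 1).contains i)
      = PySem.List.pyRange 1 301 1 := by
    rw [List.filter_congr (fun i hi => ?_)]
    · exact filter_lt 589 1 301 590 (by decide) (by norm_num) (by norm_num)
    · have := PySem.List.mem_pyRange_one.mp hi
      rw [contains_p1]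
      simp; omega
  have h2 : (PySem.List.pyRange 1 590 1).filter (fun i => (PySem.List.pyRange 301 590 1).contains i)
      = PySem.List.pyRange 301 590 1 := by
    rw [List.filter_congr (fun i hi => ?_)]
    · exact filter_ge 589 1 301 590 (by decide) (by norm_num) (by norm_num)
    · have := PySem.List.mem_pyRange_one.mp hi
      rw [contains_p2]
      simp; omega
  rw [h1, h2]
  simp

theorem ports_agree_one : get_partition_convNext 1 = get_partition_convNext_alt 1 := by
  simp only [get_partition_convNext, get_partition_convNext_alt, pvSplitB, loop1_eq]
  rw [split2]
  decide

theorem ports_agree_other (set : Int) (h : ¬ set = 1) :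
    get_partition_convNext set = get_partition_convNext_alt set := by
  have hb : (set == 1) = false := by simp [h]
  simp only [get_partition_convNext, get_partition_convNext_alt, pvSplitB, loop1_eq, hb, if_false,
    Bool.false_eq_true]
  rw [split2]
  decide

-- ===== VERDICT (by name: the statement is the Claim_ definition above) =====
theorem get_partition_convNext_spec : Claim_equal_get_partition_convNext := by
  intro set _
  unfold Spec_get_partition_convNext
  by_cases h : set = 1
  · subst h; exact ports_agree_one
  · exact ports_agree_other set h
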